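-- pv_equiv track=rewrite | github.com/jmribeiro/gridworlds | environments/shared/__init__.py | parse_grid_observation
-- ===== SOURCE A (Python) =====
-- def parse_grid_observation(obs, num_agents, num_apples):
--
--     agent_locations = []
--     agent_levels = []
--     for agent_id in range(num_agents):
--         agent_location = obs[agent_id * 2], obs[(agent_id * 2) + 1]
--         agent_level = obs[agent_id + ((num_agents + num_apples) * 2)]
--         agent_locations.append(agent_location)
--         agent_levels.append(int(agent_level))
--
--     apple_locations = []
--     apple_levels = []
--     active_apples = []
--     for apple_id in range(num_apples):
--         apple_location = obs[(apple_id + num_agents) * 2], obs[((apple_id + num_agents) * 2) + 1]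
--         apple_level = obs[apple_id + ((num_agents + num_apples) * 2) + num_agents]
--         active_apple = bool(obs[apple_id + ((num_agents + num_apples) * 2) + num_agents + num_apples])
--         apple_locations.append(apple_location)
--         apple_levels.append(int(apple_level))
--         active_apples.append(bool(active_apple))
--
--     return agent_locations, apple_locations, agent_levels, apple_levels, active_apples
-- ===== SOURCE B (Python) =====
-- def parse_grid_observation(obs, num_agents, num_apples):
--     # a negative count means "none", as range() treats it in the original
--     num_agents = max(num_agents, 0)
--     num_apples = max(num_apples, 0)
--     n = num_agents + num_apples
--     if len(obs) < 3 * n + num_apples: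
--         raise IndexError("observation shorter than its layout")
--     positions = obs[:2 * n]
--     levels = [int(x) for x in obs[2 * n:3 * n]]
--     active = [bool(x) for x in obs[3 * n:3 * n + num_apples]]
--     pairs = []
--     i = 0
--     while i + 1 < len(positions):
--         pairs.append((positions[i], positions[i + 1]))
--         i += 2
--     return (pairs[:num_agents], pairs[num_agents:],
--             levels[:num_agents], levels[num_agents:], active)
-- ===== Notes on version B (the rewrite author's own statement) =====
-- stated objective: simpler
-- what changed: Instead of recomputing a per-element offset inside two index loops, B slices the flat observation into its three contiguous blocks (positions, levels, active flags), chunks the positions block into coordinate pairs in one pass, and splits the pair and level lists at num_agents (negative counts are clamped to zero, matching the original's empty range loops).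
-- outside the precondition, e.g. on parse_grid_observation([1, 0, 2], 1, -1): A returns ([(1, 0)], [], [1], [], []), B returns ([(1, 0)], [], [2], [], [])
import Mathlib
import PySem

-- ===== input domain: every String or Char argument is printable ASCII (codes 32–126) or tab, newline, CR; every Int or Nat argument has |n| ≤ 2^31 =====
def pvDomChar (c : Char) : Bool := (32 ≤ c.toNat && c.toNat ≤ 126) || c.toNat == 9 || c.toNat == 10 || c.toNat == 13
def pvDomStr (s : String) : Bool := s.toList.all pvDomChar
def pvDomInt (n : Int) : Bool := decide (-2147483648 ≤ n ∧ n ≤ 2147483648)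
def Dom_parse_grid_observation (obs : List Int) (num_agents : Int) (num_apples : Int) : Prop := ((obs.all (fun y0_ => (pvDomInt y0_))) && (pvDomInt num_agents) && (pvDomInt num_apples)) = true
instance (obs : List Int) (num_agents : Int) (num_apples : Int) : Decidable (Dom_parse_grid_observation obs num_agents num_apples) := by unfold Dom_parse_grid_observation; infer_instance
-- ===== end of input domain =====

-- B slices the observation into its three contiguous blocks and chunks the positions block
-- into coordinate pairs in one pass, instead of A's per-element offset arithmetic (objective: simpler).

-- ===== PORT A =====
def parse_grid_observation (obs : List Int) (num_agents : Int) (num_apples : Int) : (List (Int × Int)) × (List (Int × Int)) × List Int × List Int × List Bool :=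
  let s1 := (PySem.List.pyRange 0 num_agents 1).foldl
    (fun (acc : List (Int × Int) × List Int) agent_id =>
      let agent_location := (PySem.List.pyGetD obs (agent_id * 2) 0, PySem.List.pyGetD obs (agent_id * 2 + 1) 0)
      let agent_level := PySem.List.pyGetD obs (agent_id + (num_agents + num_apples) * 2) 0
      (acc.1 ++ [agent_location], acc.2 ++ [agent_level])) ([], [])
  let s2 := (PySem.List.pyRange 0 num_apples 1).foldl
    (fun (acc : List (Int × Int) × List Int × List Bool) apple_id =>
      let apple_location := (PySem.List.pyGetD obs ((apple_id + num_agents) * 2) 0, PySem.List.pyGetD obs ((apple_id + num_agents) * 2 + 1) 0)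
      let apple_level := PySem.List.pyGetD obs (apple_id + (num_agents + num_apples) * 2 + num_agents) 0
      let active_apple := decide (PySem.List.pyGetD obs (apple_id + (num_agents + num_apples) * 2 + num_agents + num_apples) 0 ≠ 0)
      (acc.1 ++ [apple_location], acc.2.1 ++ [apple_level], acc.2.2 ++ [active_apple])) ([], [], [])
  (s1.1, s2.1, s1.2, s2.2.1, s2.2.2)

-- ===== PORT B =====
-- the 'while i + 1 < len(positions): pairs.append((positions[i], positions[i+1])); i += 2' loop,
-- consuming two elements per step
def pvPairUp : List Int → List (Int × Int)
  | a :: b :: rest => (a, b) :: pvPairUp rest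
  | _ => []

def parse_grid_observation_alt (obs : List Int) (num_agents : Int) (num_apples : Int) : (List (Int × Int)) × (List (Int × Int)) × List Int × List Int × List Bool :=
  let num_agents := max num_agents 0  -- a negative count means "none"
  let num_apples := max num_apples 0
  let n := num_agents + num_apples
  if (obs.length : Int) < 3 * n + num_apples then ([], [], [], [], [])  -- Python B raises IndexError here
  else
  let positions := PySem.List.slice obs none (some (2 * n))
  let levels := (PySem.List.slice obs (some (2 * n)) (some (3 * n))).map (fun x => x)  -- int(x) on an int is x
  let active := (PySem.List.slice obs (some (3 * n)) (some (3 * n + num_apples))).map (fun x => decide (x ≠ 0))  -- bool(x)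
  let pairs := pvPairUp positions
  (PySem.List.slice pairs none (some num_agents),
   PySem.List.slice pairs (some num_agents) none,
   PySem.List.slice levels none (some num_agents),
   PySem.List.slice levels (some num_agents) none,
   active)

-- ===== PRECONDITION & SPEC =====
-- Pre_ excludes inputs where A's indexing raises IndexError (obs shorter than the layout needs) and
-- mixed-sign counts, on which A's Python negative indices wrap around the array by accident;
-- it keeps both-nonpositive counts, where A's empty range loops and B both return five empty lists.
def Pre_parse_grid_observation (obs : List Int) (num_agents : Int) (num_apples : Int) : Prop :=
  (0 ≤ num_agents ∧ 0 ≤ num_apples ∧ 3 * num_agents + 4 * num_apples ≤ (obs.length : Int)) ∨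
  (num_agents ≤ 0 ∧ num_apples ≤ 0)
instance (obs : List Int) (num_agents : Int) (num_apples : Int) : Decidable (Pre_parse_grid_observation obs num_agents num_apples) := by unfold Pre_parse_grid_observation; infer_instance

def pvWitness_parse_grid_observation : List Int × Int × Int := ([1, 2, 3, 4, 5, 6, 7, 1], 1, 1)

def Spec_parse_grid_observation (obs : List Int) (num_agents : Int) (num_apples : Int) (out : (List (Int × Int)) × (List (Int × Int)) × List Int × List Int × List Bool) : Prop := out = parse_grid_observation_alt obs num_agents num_apples
instance (obs : List Int) (num_agents : Int) (num_apples : Int) (out : (List (Int × Int)) × (List (Int × Int)) × List Int × List Int × List Bool) : Decidable (Spec_parse_grid_observation obs num_agents num_apples out) := by unfold Spec_parse_grid_observation; infer_instance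

-- ===== CLAIM (what is proved, stated in full; the proofs are below) =====
def Claim_equal_parse_grid_observation : Prop := ∀ (obs : List Int) (num_agents : Int) (num_apples : Int), Dom_parse_grid_observation obs num_agents num_apples → Pre_parse_grid_observation obs num_agents num_apples → Spec_parse_grid_observation obs num_agents num_apples (parse_grid_observation obs num_agents num_apples)

-- ===== LEMMAS AND PROOFS =====

theorem pvPairUp_length : ∀ (xs : List Int), (pvPairUp xs).length = xs.length / 2
  | [] => rfl
  | [_] => by simp [pvPairUp]
  | a :: b :: rest => by
    simp only [pvPairUp, List.length_cons, pvPairUp_length rest]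
    omega

theorem pvPairUp_getElem : ∀ (xs : List Int) (i : ℕ) (h : 2 * i + 1 < xs.length)
    (h' : i < (pvPairUp xs).length),
    (pvPairUp xs)[i] = (xs[2 * i], xs[2 * i + 1])
  | a :: b :: rest, 0, _, _ => rfl
  | a :: b :: rest, i + 1, h, h' => by
    have hr : 2 * i + 1 < rest.length := by simp at h; omega
    have hr' : i < (pvPairUp rest).length := by rw [pvPairUp_length]; omega
    show (pvPairUp rest)[i] = _
    rw [pvPairUp_getElem rest i hr hr']
    simp only [show 2 * (i + 1) = 2 * i + 1 + 1 by ring, List.getElem_cons_succ]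

theorem pvIdx (obs : List Int) (j : ℕ) (h : j < obs.length) (e : Int) (he : e = (j : Int)) :
    PySem.List.pyGetD obs e 0 = obs[j] := by
  subst he
  rw [PySem.List.pyGetD_natCast]
  exact List.getD_eq_getElem obs 0 h

theorem pv_main (obs : List Int) (a p : ℕ) (hlen : 3 * a + 4 * p ≤ obs.length) :
    parse_grid_observation obs (a : Int) (p : Int) = parse_grid_observation_alt obs (a : Int) (p : Int) := by
  unfold parse_grid_observation parse_grid_observation_alt
  rw [show max (a : Int) 0 = (a : Int) from max_eq_left (by positivity),
    show max (p : Int) 0 = (p : Int) from max_eq_left (by positivity)]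
  rw [if_neg (by omega)]
  rw [PySem.List.foldl_prod_mk
      (f := fun (l : List (Int × Int)) agent_id => l ++ [(PySem.List.pyGetD obs (agent_id * 2) 0, PySem.List.pyGetD obs (agent_id * 2 + 1) 0)])
      (g := fun (l : List Int) agent_id => l ++ [PySem.List.pyGetD obs (agent_id + ((a : Int) + (p : Int)) * 2) 0]),
    PySem.List.foldl_prod_mk
      (f := fun (l : List (Int × Int)) apple_id => l ++ [(PySem.List.pyGetD obs ((apple_id + (a : Int)) * 2) 0, PySem.List.pyGetD obs ((apple_id + (a : Int)) * 2 + 1) 0)])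
      (g := fun (s : List Int × List Bool) apple_id =>
        (s.1 ++ [PySem.List.pyGetD obs (apple_id + ((a : Int) + (p : Int)) * 2 + (a : Int)) 0],
         s.2 ++ [decide (PySem.List.pyGetD obs (apple_id + ((a : Int) + (p : Int)) * 2 + (a : Int) + (p : Int)) 0 ≠ 0)])),
    PySem.List.foldl_prod_mk
      (f := fun (l : List Int) apple_id => l ++ [PySem.List.pyGetD obs (apple_id + ((a : Int) + (p : Int)) * 2 + (a : Int)) 0])
      (g := fun (l : List Bool) apple_id => l ++ [decide (PySem.List.pyGetD obs (apple_id + ((a : Int) + (p : Int)) * 2 + (a : Int) + (p : Int)) 0 ≠ 0)])]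
  simp only [PySem.List.foldl_append_singleton_eq_map, List.nil_append, PySem.List.pyRange_one,
    List.map_map, Int.sub_zero, Function.comp_def, zero_add]
  rw [show (3 * ((a : Int) + p) + p) = ((3 * (a + p) + p : ℕ) : Int) by push_cast; ring,
    show (3 * ((a : Int) + p)) = ((3 * (a + p) : ℕ) : Int) by push_cast; ring,
    show (2 * ((a : Int) + p)) = ((2 * (a + p) : ℕ) : Int) by push_cast; ring]
  simp only [PySem.List.slice_to_natCast, PySem.List.slice_from_natCast, PySem.List.slice_natCast,
    List.map_id', Prod.mk.injEq]
  have hptake : (obs.take (2 * (a + p))).length = 2 * (a + p) := by simp; omega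
  have hplen : (pvPairUp (obs.take (2 * (a + p)))).length = a + p := by
    rw [pvPairUp_length, hptake]; omega
  refine ⟨?_, ?_, ?_, ?_, ?_⟩
  · -- agent_locations
    apply List.ext_getElem
    · simp [hplen]
    · intro i hi hi'
      simp only [List.getElem_map, List.getElem_range, List.getElem_take]
      rw [pvPairUp_getElem _ i (by rw [hptake]; simp at hi'; omega) (by rw [hplen]; simp at hi'; omega)]
      simp only [List.getElem_take]
      simp only [Prod.mk.injEq]
      refine ⟨?_, ?_⟩
      · rw [pvIdx obs (2 * i) (by simp at hi; omega) _ (by push_cast; ring)]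
      · rw [pvIdx obs (2 * i + 1) (by simp at hi; omega) _ (by push_cast; ring)]
  · -- apple_locations
    apply List.ext_getElem
    · simp [hplen]
    · intro i hi hi'
      simp only [List.getElem_map, List.getElem_range, List.getElem_drop]
      rw [pvPairUp_getElem _ (a + i) (by rw [hptake]; simp at hi'; omega) (by rw [hplen]; simp at hi'; omega)]
      simp only [List.getElem_take]
      simp only [List.length_map, List.length_range] at hi
      simp only [Prod.mk.injEq]
      refine ⟨?_, ?_⟩
      · rw [pvIdx obs (2 * (a + i)) (by omega) _ (by push_cast; ring)]
      · rw [pvIdx obs (2 * (a + i) + 1) (by omega) _ (by push_cast; ring)]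
  · -- agent_levels
    apply List.ext_getElem
    · simp; omega
    · intro i hi hi'
      simp only [List.getElem_map, List.getElem_range, List.getElem_take, List.getElem_drop]
      simp only [List.length_map, List.length_range] at hi
      rw [pvIdx obs (2 * (a + p) + i) (by omega) _ (by push_cast; ring)]
  · -- apple_levels
    apply List.ext_getElem
    · simp; omega
    · intro i hi hi'
      simp only [List.getElem_map, List.getElem_range, List.getElem_take, List.getElem_drop]
      simp only [List.length_map, List.length_range] at hi
      rw [pvIdx obs (2 * (a + p) + (a + i)) (by omega) _ (by push_cast; ring)]
  · -- active_apples
    apply List.ext_getElem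
    · simp; omega
    · intro i hi hi'
      simp only [List.getElem_map, List.getElem_range, List.getElem_take, List.getElem_drop]
      simp only [List.length_map, List.length_range] at hi
      rw [pvIdx obs (3 * (a + p) + i) (by omega) _ (by push_cast; ring)]

-- ===== VERDICT (by name: the statement is the Claim_ definition above) =====
theorem parse_grid_observation_spec : Claim_equal_parse_grid_observation := by
  intro obs num_agents num_apples _ hpre
  unfold Spec_parse_grid_observation
  rcases hpre with ⟨h1, h2, h3⟩ | ⟨h1, h2⟩
  · lift num_agents to ℕ using h1 with a
    lift num_apples to ℕ using h2 with p
    exact pv_main obs a p (by exact_mod_cast h3)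
  · unfold parse_grid_observation parse_grid_observation_alt
    rw [PySem.List.pyRange_one_eq_nil (b := num_agents) (by omega),
      PySem.List.pyRange_one_eq_nil (b := num_apples) (by omega),
      max_eq_right h1, max_eq_right h2]
    rw [if_neg (by simp)]
    simp [PySem.List.slice, pvPairUp]
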